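-- pv_equiv track=rewrite | github.com/d1zm4as/CodeWars | Python/6 Kyu/simple_string_extension.py | string_expansion
-- ===== SOURCE A (Python) =====
-- def string_expansion(s):
--     if not s:
--         return ""
--
--
--     ref = set(["0","1","2","3","4","5","6","7","8","9"])
--     copy = ""
--
--     ant = s[0]
--     if ant not in ref:
--             copy+=ant
--
--     for x in s[1:]:
--
--
--         if x in ref and ant in ref : # se ant e x forem numeros
--             ant = x
--         if ant not in ref and x in ref: # se ant nao esta em ref e x esta
--             ant  = x
--         if ant in ref and x not in ref: # se sรณ ant for numero
--                 copy+=x*int(ant)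
--         if not ant in ref and  not x in ref: # se dois nao foram num
--                 copy+=x
--
--     return copy
-- ===== SOURCE B (Python) =====
-- def string_expansion(s):
--     # Two-phase: segment the string at digits into (multiplier, text) groups, then expand.
--     segments = []
--     mult, cur = 1, []
--     for ch in s:
--         if '0' <= ch <= '9':
--             segments.append((mult, cur))
--             mult, cur = ord(ch) - 48, []
--         else:
--             cur.append(ch)
--     segments.append((mult, cur))
--     return ''.join(c * m for m, seg in segments for c in seg)
-- ===== Notes on version B (the rewrite author's own statement) =====
-- stated objective: alternative
-- what changed: A tracks the previous character char-by-char with four interacting branches; B does a two-phase pass: segment the string at ASCII digits into (multiplier, text) groups, then expand every character of each group by its group's multiplier and join.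
import Mathlib
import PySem

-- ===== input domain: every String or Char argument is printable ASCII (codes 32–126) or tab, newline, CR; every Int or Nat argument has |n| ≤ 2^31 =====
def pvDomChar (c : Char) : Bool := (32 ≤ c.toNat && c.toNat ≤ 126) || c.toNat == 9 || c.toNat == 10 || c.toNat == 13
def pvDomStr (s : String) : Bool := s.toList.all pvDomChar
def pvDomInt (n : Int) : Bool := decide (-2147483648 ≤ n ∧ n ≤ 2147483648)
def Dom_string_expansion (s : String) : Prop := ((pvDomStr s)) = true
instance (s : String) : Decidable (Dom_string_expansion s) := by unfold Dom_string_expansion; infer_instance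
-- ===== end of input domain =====

-- B replaces A's char-by-char previous-character tracking with a two-phase pass
-- (segment at digits into (multiplier, text) groups, then expand each group); objective: alternative decomposition.

-- ===== PORT A =====
def refSet : PySem.Set Char := PySem.Set.ofList ['0','1','2','3','4','5','6','7','8','9']

def stepA (st : List Char × Char) (x : Char) : List Char × Char :=
  let copy := st.1
  let ant := st.2
  let ant := if refSet.contains x && refSet.contains ant then x else ant
  let ant := if !refSet.contains ant && refSet.contains x then x else ant
  let copy := if refSet.contains ant && !refSet.contains x then
      copy ++ PySem.List.pyRepeat [x] ((PySem.Int.ofChars? [ant]).getD 0) else copy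
  let copy := if !refSet.contains ant && !refSet.contains x then copy ++ [x] else copy
  (copy, ant)

def string_expansion (s : String) : String :=
  if s.toList = [] then "" else
    let cs := s.toList
    let ant := cs.headD ' '   -- s[0]; the guard above ensures cs ≠ []
    let copy : List Char := if !refSet.contains ant then [ant] else []
    let r := (PySem.List.slice cs (some 1) none).foldl stepA (copy, ant)
    String.mk r.1

-- ===== PORT B =====
def stepB (st : List (Nat × List Char) × Nat × List Char) (ch : Char) :
    List (Nat × List Char) × Nat × List Char :=
  let segs := st.1
  let mult := st.2.1
  let cur := st.2.2
  if '0' ≤ ch ∧ ch ≤ '9' then (segs ++ [(mult, cur)], ch.toNat - 48, ([] : List Char))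
  else (segs, mult, cur ++ [ch])

def string_expansion_alt (s : String) : String :=
  let st := s.toList.foldl stepB ([], 1, [])
  let segs := st.1 ++ [(st.2.1, st.2.2)]
  String.mk (segs.flatMap fun p => p.2.flatMap fun c => List.replicate p.1 c)

-- ===== PRECONDITION & SPEC =====
def Spec_string_expansion (s : String) (out : String) : Prop := out = string_expansion_alt s
instance (s : String) (out : String) : Decidable (Spec_string_expansion s out) := by unfold Spec_string_expansion; infer_instance

-- ===== CLAIM (what is proved, stated in full; the proofs are below) =====
def Claim_equal_string_expansion : Prop := ∀ (s : String), Dom_string_expansion s → Spec_string_expansion s (string_expansion s)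

-- ===== LEMMAS AND PROOFS =====
def isDig (c : Char) : Bool := decide (48 ≤ c.toNat ∧ c.toNat ≤ 57)

-- the common "expand the rest of the string with current multiplier m" function both folds compute
def expSpec : Nat → List Char → List Char
  | _, [] => []
  | m, c :: cs => if isDig c then expSpec (c.toNat - 48) cs else List.replicate m c ++ expSpec m cs

def render (segs : List (Nat × List Char)) : List Char :=
  segs.flatMap fun p => p.2.flatMap fun c => List.replicate p.1 c

def finishB (st : List (Nat × List Char) × Nat × List Char) : List Char :=
  render (st.1 ++ [(st.2.1, st.2.2)])

lemma digit_cases (c : Char) (h : isDig c = true) :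
    c = '0' ∨ c = '1' ∨ c = '2' ∨ c = '3' ∨ c = '4' ∨ c = '5' ∨ c = '6' ∨ c = '7' ∨ c = '8' ∨ c = '9' := by
  have hb : 48 ≤ c.toNat ∧ c.toNat ≤ 57 := by simpa [isDig] using h
  have hv : c.toNat = c.val.toNat := rfl
  have : c.val.toNat = 48 ∨ c.val.toNat = 49 ∨ c.val.toNat = 50 ∨ c.val.toNat = 51 ∨ c.val.toNat = 52 ∨
      c.val.toNat = 53 ∨ c.val.toNat = 54 ∨ c.val.toNat = 55 ∨ c.val.toNat = 56 ∨ c.val.toNat = 57 := by omega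
  rcases this with h|h|h|h|h|h|h|h|h|h <;>
    simp [Char.ext_iff, UInt32.ext_iff] <;> omega

lemma contains_ref (c : Char) : refSet.contains c = isDig c := by
  by_cases h : refSet.contains c = true
  · have h' : c ∈ (['0','1','2','3','4','5','6','7','8','9'] : List Char) := by
      have := PySem.Set.contains_iff (s := refSet) (x := c)
      simpa [refSet, PySem.Set.ofList] using this.mp h
    have : isDig c = true := by fin_cases h' <;> decide
    rw [h, this]
  · rw [Bool.not_eq_true] at h
    by_cases hd : isDig c = true
    · exfalso
      rcases digit_cases c hd with h'|h'|h'|h'|h'|h'|h'|h'|h'|h' <;> subst h' <;> simp_all <;>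
        revert h <;> decide
    · rw [h, Bool.not_eq_true] at *
      rw [hd]

lemma ofChars_digit (c : Char) (h : isDig c = true) :
    ((PySem.Int.ofChars? [c]).getD 0).toNat = c.toNat - 48 := by
  rcases digit_cases c h with h'|h'|h'|h'|h'|h'|h'|h'|h'|h' <;> subst h' <;> decide

lemma le_iff_isDig (c : Char) : ('0' ≤ c ∧ c ≤ '9') ↔ isDig c = true := by
  have h0 : ('0' ≤ c) ↔ 48 ≤ c.toNat := by
    constructor <;> intro h <;>
      simpa [Char.le_def, UInt32.le_iff_toNat_le] using h
  have h9 : (c ≤ '9') ↔ c.toNat ≤ 57 := by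
    constructor <;> intro h <;>
      simpa [Char.le_def, UInt32.le_iff_toNat_le] using h
  simp [isDig, h0, h9]

lemma mem_ref (c : Char) : c ∈ refSet ↔ isDig c = true := by
  rw [← PySem.Set.contains_iff, contains_ref]

lemma stepA_digit (copy : List Char) (ant x : Char) (hx : isDig x = true) :
    stepA (copy, ant) x = (copy, x) := by
  by_cases ha : isDig ant = true <;> simp [stepA, mem_ref, hx, ha]

lemma stepA_nondigit (copy : List Char) (ant x : Char) (hx : isDig x = false) :
    stepA (copy, ant) x =
      (if isDig ant then copy ++ List.replicate (ant.toNat - 48) x else copy ++ [x], ant) := by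
  by_cases ha : isDig ant = true
  · simp [stepA, mem_ref, hx, ha, PySem.List.pyRepeat_singleton, ofChars_digit ant ha]
  · simp [stepA, mem_ref, hx, ha]

lemma foldA_eq (cs : List Char) : ∀ (copy : List Char) (ant : Char),
    (cs.foldl stepA (copy, ant)).1 =
      copy ++ expSpec (if isDig ant then ant.toNat - 48 else 1) cs := by
  induction cs with
  | nil => intro copy ant; simp [expSpec]
  | cons x rest ih =>
    intro copy ant
    by_cases hx : isDig x = true
    · rw [List.foldl_cons, stepA_digit copy ant x hx, ih]
      simp [expSpec, hx]
    · rw [List.foldl_cons, stepA_nondigit copy ant x (by simpa using hx), ih]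
      by_cases ha : isDig ant = true <;>
        simp [expSpec, hx, ha]

lemma foldB_eq (cs : List Char) : ∀ (segs : List (Nat × List Char)) (mult : Nat) (cur : List Char),
    finishB (cs.foldl stepB (segs, mult, cur)) =
      render segs ++ cur.flatMap (fun c => List.replicate mult c) ++ expSpec mult cs := by
  induction cs with
  | nil => intro segs mult cur; simp [finishB, render, expSpec]
  | cons x rest ih =>
    intro segs mult cur
    by_cases hx : isDig x = true
    · have hc : ('0' ≤ x ∧ x ≤ '9') := (le_iff_isDig x).mpr hx
      rw [List.foldl_cons]
      simp only [stepB, if_pos hc]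
      rw [ih]
      simp [expSpec, hx, render]
    · have hc : ¬ ('0' ≤ x ∧ x ≤ '9') := fun h => hx ((le_iff_isDig x).mp h)
      rw [List.foldl_cons]
      simp only [stepB, if_neg hc]
      rw [ih]
      simp [expSpec, hx]

-- ===== VERDICT (by name: the statement is the Claim_ definition above) =====
theorem string_expansion_spec : Claim_equal_string_expansion := by
  intro s _
  unfold Spec_string_expansion
  have hB : string_expansion_alt s = String.mk (finishB (s.toList.foldl stepB ([], 1, []))) := rfl
  have hB2 : string_expansion_alt s = String.mk (expSpec 1 s.toList) := by
    rw [hB, foldB_eq]; simp [render]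
  have hA : string_expansion s = String.mk (expSpec 1 s.toList) := by
    cases hs : s.toList with
    | nil =>
      show (if s.toList = [] then "" else _) = _
      rw [hs, if_pos rfl]; rfl
    | cons c cs =>
      simp only [string_expansion, hs]
      rw [if_neg (List.cons_ne_nil c cs)]
      rw [PySem.List.slice_from_one]
      simp only [List.tail_cons, List.headD_cons]
      rw [foldA_eq]
      by_cases hc : isDig c = true
      · simp [expSpec, hc, mem_ref]
      · simp [expSpec, hc, mem_ref, List.replicate]
  rw [hA, hB2]
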